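-- pv_equiv track=rewrite | github.com/FabianUB/minibarcelona3d | apps/poller/scripts/build_rodalies_map_data.py | select_name
-- ===== SOURCE A (Python) =====
-- from typing import Dict, Iterable, List, Sequence, Set, Tuple
--
-- def select_name(names: Iterable[str]) -> str:
--     options = [
--         " ".join(name.split())
--         for name in names
--         if name and name != "-" and name.strip()
--     ]
--     if not options:
--         return ""
--
--     # Prefer names that include a dash separator, then the longest entry.
--     options.sort(key=lambda n: ((" - " not in n), -len(n)))
--     selected = options[0]
--     if " -" in selected or "- " in selected:
--         selected = selected.replace(" -", " - ").replace("- ", " - ")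
--         selected = " ".join(selected.split())
--     return selected
-- ===== SOURCE B (Python) =====
-- def select_name(names):
--     # One streaming pass: track the first longest normalized name overall and
--     # the first longest one containing " - "; no intermediate list, no sort.
--     best_all = None
--     best_dashed = None
--     for raw in names:
--         if not raw or raw == "-" or not raw.strip():
--             continue
--         n = " ".join(raw.split())
--         if best_all is None or len(n) > len(best_all):
--             best_all = n
--         if " - " in n and (best_dashed is None or len(n) > len(best_dashed)):
--             best_dashed = n
--     selected = best_dashed if best_dashed is not None else best_all
--     if selected is None:
--         return ""
--     if " -" in selected or "- " in selected:
--         selected = selected.replace(" -", " - ").replace("- ", " - ")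
--         selected = " ".join(selected.split())
--     return selected
-- ===== Notes on version B (the rewrite author's own statement) =====
-- stated objective: faster
-- what changed: Replaces A's build-list-then-composite-key-stable-sort-then-take-head with a single streaming pass over the raw names maintaining two accumulators (first longest normalized name overall and first longest dash-containing one), never materialising the options list or sorting.
import Mathlib
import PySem

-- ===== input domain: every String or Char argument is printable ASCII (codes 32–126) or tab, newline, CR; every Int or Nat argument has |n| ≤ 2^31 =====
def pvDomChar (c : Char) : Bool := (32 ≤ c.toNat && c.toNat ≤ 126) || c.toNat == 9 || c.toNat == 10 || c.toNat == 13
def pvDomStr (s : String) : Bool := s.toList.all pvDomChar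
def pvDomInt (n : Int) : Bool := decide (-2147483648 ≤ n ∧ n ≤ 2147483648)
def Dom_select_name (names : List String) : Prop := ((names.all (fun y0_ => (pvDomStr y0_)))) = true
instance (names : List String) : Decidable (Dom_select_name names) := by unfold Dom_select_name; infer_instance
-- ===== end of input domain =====

-- B replaces A's build-list / composite-key stable sort / take-head by one streaming pass
-- holding two accumulators (first longest name overall, first longest dash-containing one)
-- (objective: alternative).

-- ===== PORT A =====
-- options = [" ".join(name.split()) for name in names if name and name != "-" and name.strip()]
def pvNormalize (name : String) : String := PySem.Str.join " " (PySem.Str.split₀ name)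

def pvKeep (name : String) : Bool :=
  decide (name ≠ "") && decide (name ≠ "-") && decide (PySem.Str.strip name ≠ "")

def pvOptions (names : List String) : List String := (names.filter pvKeep).map pvNormalize

-- the final dash-respacing postprocess of A
def pvRespace (selected : String) : String :=
  if PySem.Str.isIn " -" selected || PySem.Str.isIn "- " selected then
    PySem.Str.join " " (PySem.Str.split₀
      (PySem.Str.replace (PySem.Str.replace selected " -" " - ") "- " " - "))
  else selected

def select_name (names : List String) : String :=
  let options := pvOptions names
  if options = [] then ""
  else
    -- options.sort(key=lambda n: ((" - " not in n), -len(n)))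
    let sortedOpts := PySem.List.sorted2 options
      (fun n => !(PySem.Str.isIn " - " n)) (fun n => -(PySem.Str.len n))
    -- options[0]; options is non-empty on this branch, so headD "" is exact
    let selected := sortedOpts.headD ""
    pvRespace selected

-- ===== PORT B =====
-- single pass over the raw names; (best_all, best_dashed) as an accumulator pair,
-- final respacing lines identical to A's (they are the same Python lines)
def select_name_alt (names : List String) : String :=
  let st := names.foldl
    (fun (st : Option String × Option String) raw =>
      if raw = "" || raw = "-" || PySem.Str.strip raw = "" then st   -- continue
      else
        let n := PySem.Str.join " " (PySem.Str.split₀ raw)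
        let bestAll : Option String :=
          match st.1 with
          | none => some n
          | some b => if PySem.Str.len b < PySem.Str.len n then some n else some b
        let bestDashed : Option String :=
          if PySem.Str.isIn " - " n then
            match st.2 with
            | none => some n
            | some b => if PySem.Str.len b < PySem.Str.len n then some n else some b
          else st.2
        (bestAll, bestDashed))
    (none, none)
  -- selected = best_dashed if best_dashed is not None else best_all
  match (match st.2 with | some d => some d | none => st.1) with
  | none => ""
  | some selected =>
      if PySem.Str.isIn " -" selected || PySem.Str.isIn "- " selected then
        PySem.Str.join " " (PySem.Str.split₀
          (PySem.Str.replace (PySem.Str.replace selected " -" " - ") "- " " - "))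
      else selected

-- ===== PRECONDITION & SPEC =====
def Spec_select_name (names : List String) (out : String) : Prop := out = select_name_alt names
instance (names : List String) (out : String) : Decidable (Spec_select_name names out) := by unfold Spec_select_name; infer_instance

-- ===== CLAIM (what is proved, stated in full; the proofs are below) =====
def Claim_equal_select_name : Prop := ∀ (names : List String), Dom_select_name names → Spec_select_name names (select_name names)

-- ===== LEMMAS AND PROOFS =====

-- " - " in n
def pvP (n : String) : Bool := PySem.Str.isIn " - " n

def pvLen (n : String) : Int := PySem.Str.len n

-- the comparison sorted2 uses for A's composite key
def pvLt (x m : String) : Bool :=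
  decide ((!pvP x) < (!pvP m)) || !decide ((!pvP m) < (!pvP x)) && decide (-pvLen x < -pvLen m)

-- running "first minimum w.r.t. before" (the head of a stable insertion sort)
def pvStepGen (before : String → String → Bool) (m : Option String) (x : String) : Option String :=
  match m with
  | none => some x
  | some m' => if before x m' then some x else some m'

-- B's "keep the first strictly-longest" accumulator step
def pvStepB (m : Option String) (x : String) : Option String :=
  match m with
  | none => some x
  | some m' => if pvLen m' < pvLen x then some x else some m'

-- B's pair step on an already-normalized name
def pvStepPair (st : Option String × Option String) (n : String) : Option String × Option String :=
  (pvStepB st.1 n, if pvP n then pvStepB st.2 n else st.2)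

lemma head?_insertBy (before : String → String → Bool) (x : String) (acc : List String) :
    (PySem.List.insertBy before x acc).head? = pvStepGen before acc.head? x := by
  cases acc with
  | nil => rfl
  | cons y ys =>
      by_cases h : before x y = true <;> simp [PySem.List.insertBy, pvStepGen, h]

lemma head?_foldl_insertBy (before : String → String → Bool) :
    ∀ (xs acc : List String),
      (List.foldl (fun a x => PySem.List.insertBy before x a) acc xs).head? =
        List.foldl (pvStepGen before) acc.head? xs := by
  intro xs
  induction xs with
  | nil => intro acc; rfl
  | cons x xs ih =>
      intro acc
      simp only [List.foldl_cons]
      rw [ih, head?_insertBy]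

lemma pvLt_tf {x m : String} (hx : pvP x = true) (hm : pvP m = false) : pvLt x m = true := by
  simp [pvLt, hx, hm]

lemma pvLt_ft {x m : String} (hx : pvP x = false) (hm : pvP m = true) : pvLt x m = false := by
  simp [pvLt, hx, hm]

lemma pvLt_same {x m : String} (h : pvP x = pvP m) :
    pvLt x m = decide (pvLen m < pvLen x) := by
  have h2 : (-pvLen x < -pvLen m) ↔ (pvLen m < pvLen x) := by omega
  simp [pvLt, h, h2]

-- a fold with an always-some step never returns none on a non-empty list
lemma foldl_step_isSome (f : Option String → String → Option String)
    (hf : ∀ m x, (f m x).isSome) :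
    ∀ (xs : List String) (m : Option String),
      (List.foldl f m (xs)).isSome ∨ m = none ∧ xs = [] := by
  intro xs
  induction xs with
  | nil => intro m; cases m with
      | none => exact Or.inr ⟨rfl, rfl⟩
      | some b => exact Or.inl (by simp)
  | cons x xs ih =>
      intro m
      simp only [List.foldl_cons]
      rcases ih (f m x) with h | ⟨h1, h2⟩
      · exact Or.inl h
      · have := hf m x; rw [h1] at this; simp at this

lemma foldl_stepGen_some (before : String → String → Bool) {xs : List String} (h : xs ≠ []) :
    ∃ a, List.foldl (pvStepGen before) none xs = some a := by
  rcases foldl_step_isSome (pvStepGen before)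
      (by intro m x; cases m with
        | none => simp [pvStepGen]
        | some a => simp only [pvStepGen]; split <;> simp) xs none with h' | ⟨_, h2⟩
  · exact Option.isSome_iff_exists.mp h'
  · exact absurd h2 h

lemma foldl_stepB_some {xs : List String} (h : xs ≠ []) :
    ∃ a, List.foldl pvStepB none xs = some a := by
  rcases foldl_step_isSome pvStepB
      (by intro m x; cases m with
        | none => simp [pvStepB]
        | some a => by_cases h : pvLen a < pvLen x <;> simp [pvStepB, h]) xs none with h' | ⟨_, h2⟩
  · exact Option.isSome_iff_exists.mp h'
  · exact absurd h2 h

-- Case "no dashed option": A's first-minimum fold coincides with B's first-maximum fold.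
lemma fold_eq_no_dash :
    ∀ (xs : List String) (m : Option String),
      (∀ n ∈ xs, pvP n = false) → (∀ a, m = some a → pvP a = false) →
      List.foldl (pvStepGen pvLt) m xs = List.foldl pvStepB m xs := by
  intro xs
  induction xs with
  | nil => intro m _ _; rfl
  | cons x xs ih =>
      intro m hall hm
      have hx : pvP x = false := hall x (by simp)
      have hstep : pvStepGen pvLt m x = pvStepB m x := by
        cases m with
        | none => rfl
        | some a =>
            have ha : pvP a = false := hm a rfl
            simp [pvStepGen, pvStepB, pvLt_same (hx.trans ha.symm)]
      simp only [List.foldl_cons]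
      rw [hstep]
      refine ih (pvStepB m x) (fun n hn => hall n (by simp [hn])) ?_
      intro a ha
      cases m with
      | none => simp [pvStepB] at ha; exact ha ▸ hx
      | some b =>
          have hb : pvP b = false := hm b rfl
          simp only [pvStepB] at ha
          split at ha <;> simp at ha <;> exact ha ▸ (by assumption)

-- invariant relating A's running first-minimum to B's running first-maximum over the dashed sublist
def pvInv (mA mB : Option String) : Prop :=
  (mA = none ∧ mB = none) ∨
  (∃ a, mA = some a ∧ ((pvP a = true ∧ mB = some a) ∨ (pvP a = false ∧ mB = none)))

lemma fold_inv :
    ∀ (xs : List String) (mA mB : Option String), pvInv mA mB →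
      pvInv (List.foldl (pvStepGen pvLt) mA xs)
            (List.foldl pvStepB mB (xs.filter pvP)) := by
  intro xs
  induction xs with
  | nil => intro mA mB h; exact h
  | cons x xs ih =>
      intro mA mB h
      by_cases hx : pvP x = true
      · have hfil : (x :: xs).filter pvP = x :: xs.filter pvP := by simp [List.filter, hx]
        rw [hfil]
        simp only [List.foldl_cons]
        apply ih
        rcases h with ⟨h1, h2⟩ | ⟨a, h1, ⟨ha, h2⟩ | ⟨ha, h2⟩⟩
        · subst h1; subst h2
          exact Or.inr ⟨x, rfl, Or.inl ⟨hx, rfl⟩⟩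
        · subst h1; subst h2
          by_cases hlen : pvLen a < pvLen x
          · simp [pvStepGen, pvStepB, pvLt_same (hx.trans ha.symm), hlen]
            exact Or.inr ⟨x, rfl, Or.inl ⟨hx, rfl⟩⟩
          · simp [pvStepGen, pvStepB, pvLt_same (hx.trans ha.symm), hlen]
            exact Or.inr ⟨a, rfl, Or.inl ⟨ha, rfl⟩⟩
        · subst h1; subst h2
          simp [pvStepGen, pvStepB, pvLt_tf hx ha]
          exact Or.inr ⟨x, rfl, Or.inl ⟨hx, rfl⟩⟩
      · have hx' : pvP x = false := by simpa using hx
        have hfil : (x :: xs).filter pvP = xs.filter pvP := by simp [List.filter, hx']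
        rw [hfil]
        simp only [List.foldl_cons]
        apply ih
        rcases h with ⟨h1, h2⟩ | ⟨a, h1, ⟨ha, h2⟩ | ⟨ha, h2⟩⟩
        · subst h1; subst h2
          exact Or.inr ⟨x, rfl, Or.inr ⟨hx', rfl⟩⟩
        · subst h1; subst h2
          simp [pvStepGen, pvLt_ft hx' ha]
          exact Or.inr ⟨a, rfl, Or.inl ⟨ha, rfl⟩⟩
        · subst h1; subst h2
          by_cases hlen : pvLen a < pvLen x
          · simp [pvStepGen, pvLt_same (hx'.trans ha.symm), hlen]
            exact Or.inr ⟨x, rfl, Or.inr ⟨hx', rfl⟩⟩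
          · simp [pvStepGen, pvLt_same (hx'.trans ha.symm), hlen]
            exact Or.inr ⟨a, rfl, Or.inr ⟨ha, rfl⟩⟩

-- head of A's sorted list as a running-first-minimum fold
lemma sorted_head (options : List String) :
    (PySem.List.sorted2 options
        (fun n => !(PySem.Str.isIn " - " n)) (fun n => -(PySem.Str.len n))).head? =
      List.foldl (pvStepGen pvLt) none options := by
  show (List.foldl (fun acc x => PySem.List.insertBy _ x acc) [] options).head? = _
  rw [head?_foldl_insertBy]
  rfl

-- B's guarded fold over raw names is the pair fold over A's options list (filter/map fusion)
lemma fold_fuse (f : Option String × Option String → String → Option String × Option String) :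
    ∀ (names : List String) (init : Option String × Option String),
      List.foldl
        (fun st raw => if raw = "" || raw = "-" || PySem.Str.strip raw = "" then st
                       else f st (pvNormalize raw)) init names =
      List.foldl f init (pvOptions names) := by
  intro names
  induction names with
  | nil => intro init; rfl
  | cons raw rest ih =>
      intro init
      by_cases hk : pvKeep raw = true
      · have hg : (raw = "" || raw = "-" || PySem.Str.strip raw = "") = false := by
          simp only [pvKeep, Bool.and_eq_true, decide_eq_true_eq] at hk
          simp [hk.1.1, hk.1.2, hk.2]
        have ho : pvOptions (raw :: rest) = pvNormalize raw :: pvOptions rest := by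
          simp [pvOptions, List.filter, hk]
        rw [ho]
        simp only [List.foldl_cons, hg, Bool.false_eq_true, if_false]
        exact ih (f init (pvNormalize raw))
      · have hk' : pvKeep raw = false := by simpa using hk
        have hg : (raw = "" || raw = "-" || PySem.Str.strip raw = "") = true := by
          simp only [pvKeep] at hk'
          by_cases h1 : raw = "" <;> by_cases h2 : raw = "-" <;>
            simp_all
        have ho : pvOptions (raw :: rest) = pvOptions rest := by
          simp [pvOptions, List.filter, hk']
        rw [ho]
        simp only [List.foldl_cons, hg, if_true]
        exact ih init
  
-- the pair fold splits componentwise: overall best, and best over the dashed sublist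
lemma fold_pair :
    ∀ (xs : List String) (a d : Option String),
      List.foldl pvStepPair (a, d) xs =
        (List.foldl pvStepB a xs, List.foldl pvStepB d (xs.filter pvP)) := by
  intro xs
  induction xs with
  | nil => intro a d; rfl
  | cons x xs ih =>
      intro a d
      simp only [List.foldl_cons]
      by_cases hx : pvP x = true
      · have hfil : (x :: xs).filter pvP = x :: xs.filter pvP := by simp [List.filter, hx]
        rw [hfil]
        simp only [List.foldl_cons, pvStepPair, hx, if_true]
        exact ih (pvStepB a x) (pvStepB d x)
      · have hx' : pvP x = false := by simpa using hx
        have hfil : (x :: xs).filter pvP = xs.filter pvP := by simp [List.filter, hx']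
        rw [hfil]
        simp only [pvStepPair, hx', Bool.false_eq_true, if_false]
        exact ih (pvStepB a x) d

-- B's inline step is pvStepPair on the normalized name (definitional)
lemma alt_step_eq (st : Option String × Option String) (raw : String) :
    (let n := PySem.Str.join " " (PySem.Str.split₀ raw)
     let bestAll : Option String :=
       match st.1 with
       | none => some n
       | some b => if PySem.Str.len b < PySem.Str.len n then some n else some b
     let bestDashed : Option String :=
       if PySem.Str.isIn " - " n then
         match st.2 with
         | none => some n
         | some b => if PySem.Str.len b < PySem.Str.len n then some n else some b
       else st.2
     ((bestAll, bestDashed) : Option String × Option String)) = pvStepPair st (pvNormalize raw) := rfl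

-- ===== VERDICT (by name: the statement is the Claim_ definition above) =====
theorem select_name_spec : Claim_equal_select_name := by
  intro names _
  unfold Spec_select_name select_name select_name_alt
  simp only [alt_step_eq]
  rw [fold_fuse pvStepPair names (none, none), fold_pair]
  by_cases hopt : pvOptions names = []
  · simp [hopt]
  · simp only [hopt, if_false]
    rw [List.headD_eq_head?_getD, sorted_head]
    obtain ⟨x, hx⟩ := foldl_stepB_some (xs := pvOptions names) hopt
    by_cases hd : (pvOptions names).filter pvP = []
    · -- no dashed option: best_dashed is none, A's fold equals B's overall fold
      have hall : ∀ n ∈ pvOptions names, pvP n = false := by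
        intro n hn
        have := List.filter_eq_nil_iff.mp hd n hn
        simpa using this
      rw [fold_eq_no_dash (pvOptions names) none hall (by simp), hx, hd]
      simp [pvRespace]
    · -- some dashed option: best_dashed is some, and equals A's head by the invariant
      obtain ⟨b, hb⟩ := foldl_stepB_some (xs := (pvOptions names).filter pvP) hd
      have hinv := fold_inv (pvOptions names) none none (Or.inl ⟨rfl, rfl⟩)
      rcases hinv with ⟨h1, _⟩ | ⟨a, h1, ⟨_, h2⟩ | ⟨_, h2⟩⟩
      · obtain ⟨c, hc⟩ := foldl_stepGen_some pvLt hopt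
        rw [hc] at h1; exact absurd h1 (by simp)
      · rw [h1, h2, hb] at *
        simp [pvRespace]
      · rw [h2] at hb; exact absurd hb (by simp)
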